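-- pv_equiv track=rewrite | github.com/DP888888/FX_analysis | signal.py | MakeUniqueForMidPosOpenPosition
-- ===== SOURCE A (Python) =====
-- def MakeUniqueForMidPosOpenPosition (trace, AddPositionIndex):
--     ret = []
--     st = set()
--     midPosReach = 0
--     for each in trace:
--         if each not in st:
--             if each == AddPositionIndex and midPosReach == 0:
--                 midPosReach = 1
--                 st.clear ()
--             st.add (each)
--             ret.append (each)
--     return ret
-- ===== SOURCE B (Python) =====
-- def MakeUniqueForMidPosOpenPosition(trace, AddPositionIndex):
--     tr = list(trace)
--
--     def dedup(seg):
--         seen = set()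
--         out = []
--         for x in seg:
--             if x not in seen:
--                 seen.add(x)
--                 out.append(x)
--         return out
--
--     if AddPositionIndex in tr:
--         i = tr.index(AddPositionIndex)
--         return dedup(tr[:i]) + dedup(tr[i:])
--     return dedup(tr)
-- ===== Notes on version B (the rewrite author's own statement) =====
-- stated objective: alternative
-- what changed: Instead of one stateful loop with a mutable seen-set cleared mid-stream at the marker, B splits the trace at the first occurrence of AddPositionIndex and concatenates independent order-preserving dedups of the two segments (or dedups the whole list if the marker is absent).
import Mathlib
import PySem

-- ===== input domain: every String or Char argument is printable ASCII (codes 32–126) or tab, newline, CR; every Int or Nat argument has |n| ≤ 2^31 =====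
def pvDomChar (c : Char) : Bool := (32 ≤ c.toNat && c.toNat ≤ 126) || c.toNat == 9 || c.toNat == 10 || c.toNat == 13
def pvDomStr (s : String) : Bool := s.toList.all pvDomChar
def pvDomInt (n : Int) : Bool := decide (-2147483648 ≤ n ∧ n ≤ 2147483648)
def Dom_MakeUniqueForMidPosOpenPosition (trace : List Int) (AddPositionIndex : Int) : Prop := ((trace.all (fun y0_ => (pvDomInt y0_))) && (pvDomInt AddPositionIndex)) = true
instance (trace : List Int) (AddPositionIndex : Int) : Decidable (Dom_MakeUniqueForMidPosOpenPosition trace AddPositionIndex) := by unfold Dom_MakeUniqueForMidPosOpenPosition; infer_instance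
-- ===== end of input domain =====

-- B re-implements A's single stateful dedup loop (seen-set cleared at the first marker) as
-- split-at-first-marker plus two independent dedups; equivalence of return values is proved.

-- ===== PORT A =====
-- the for-loop of A as structural recursion over trace; state: st (the set), midPosReach; ret built by cons
def pvLoopA (AddPositionIndex : Int) : List Int → PySem.Set Int → Int → List Int
  | [], _, _ => []
  | each :: rest, st, midPosReach =>
    if PySem.Set.contains st each then pvLoopA AddPositionIndex rest st midPosReach
    else if each = AddPositionIndex ∧ midPosReach = 0 then
      each :: pvLoopA AddPositionIndex rest (PySem.Set.add PySem.Set.empty each) 1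
    else
      each :: pvLoopA AddPositionIndex rest (PySem.Set.add st each) midPosReach

def MakeUniqueForMidPosOpenPosition (trace : List Int) (AddPositionIndex : Int) : List Int :=
  pvLoopA AddPositionIndex trace PySem.Set.empty 0

-- ===== PORT B =====
-- B's dedup helper: order-preserving set-based dedup of one segment
def pvDedupSeg : List Int → PySem.Set Int → List Int
  | [], _ => []
  | x :: rest, seen =>
    if PySem.Set.contains seen x then pvDedupSeg rest seen
    else x :: pvDedupSeg rest (PySem.Set.add seen x)

def MakeUniqueForMidPosOpenPosition_alt (trace : List Int) (AddPositionIndex : Int) : List Int :=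
  match PySem.List.index? trace AddPositionIndex with
  | none => pvDedupSeg trace PySem.Set.empty
  | some i =>
      pvDedupSeg (PySem.List.slice trace none (some (i : Int))) PySem.Set.empty
        ++ pvDedupSeg (PySem.List.slice trace (some (i : Int)) none) PySem.Set.empty

-- ===== PRECONDITION & SPEC =====
def Spec_MakeUniqueForMidPosOpenPosition (trace : List Int) (AddPositionIndex : Int) (out : List Int) : Prop := out = MakeUniqueForMidPosOpenPosition_alt trace AddPositionIndex
instance (trace : List Int) (AddPositionIndex : Int) (out : List Int) : Decidable (Spec_MakeUniqueForMidPosOpenPosition trace AddPositionIndex out) := by unfold Spec_MakeUniqueForMidPosOpenPosition; infer_instance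

-- ===== CLAIM (what is proved, stated in full; the proofs are below) =====
def Claim_equal_MakeUniqueForMidPosOpenPosition : Prop := ∀ (trace : List Int) (AddPositionIndex : Int), Dom_MakeUniqueForMidPosOpenPosition trace AddPositionIndex → Spec_MakeUniqueForMidPosOpenPosition trace AddPositionIndex (MakeUniqueForMidPosOpenPosition trace AddPositionIndex)

-- ===== LEMMAS AND PROOFS =====

-- once midPosReach = 1, A's loop is exactly B's dedup
theorem pvLoopA_one (A : Int) (t : List Int) (st : PySem.Set Int) :
    pvLoopA A t st 1 = pvDedupSeg t st := by
  induction t generalizing st with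
  | nil => rfl
  | cons x rest ih =>
    by_cases h : x ∈ st
    · simp [pvLoopA, pvDedupSeg, h, ih]
    · simp [pvLoopA, pvDedupSeg, h, ih]

-- main invariant: while the marker has not been seen, A's loop equals split-at-first-marker dedups
theorem pvLoopA_zero (A : Int) (t : List Int) (st : PySem.Set Int)
    (hA : A ∉ st) :
    pvLoopA A t st 0 =
      (match PySem.List.index? t A with
       | none => pvDedupSeg t st
       | some i => pvDedupSeg (t.take i) st ++ pvDedupSeg (t.drop i) PySem.Set.empty) := by
  induction t generalizing st with
  | nil => rfl
  | cons x rest ih =>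
    by_cases hx : x = A
    · subst hx
      rw [PySem.List.index?_cons_self]
      simp [pvLoopA, pvDedupSeg, hA, pvLoopA_one]
    · rw [PySem.List.index?_cons_of_ne rest hx]
      by_cases hmem : x ∈ st
      · have hstep : pvLoopA A (x :: rest) st 0 = pvLoopA A rest st 0 := by
          simp [pvLoopA, hmem]
        rw [hstep, ih st hA]
        cases hidx : PySem.List.index? rest A with
        | none => simp [pvDedupSeg, hmem]
        | some i => simp [pvDedupSeg, hmem]
      · have hA' : A ∉ PySem.Set.add st x := by
          simp [PySem.Set.mem_add, hA]
          exact fun h => hx h.symm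
        have hstep : pvLoopA A (x :: rest) st 0 =
            x :: pvLoopA A rest (PySem.Set.add st x) 0 := by
          simp [pvLoopA, hmem, hx]
        rw [hstep, ih (PySem.Set.add st x) hA']
        cases hidx : PySem.List.index? rest A with
        | none => simp [pvDedupSeg, hmem]
        | some i => simp [pvDedupSeg, hmem]

-- ===== VERDICT (by name: the statement is the Claim_ definition above) =====
theorem MakeUniqueForMidPosOpenPosition_spec : Claim_equal_MakeUniqueForMidPosOpenPosition := by
  intro trace A _
  show MakeUniqueForMidPosOpenPosition trace A = MakeUniqueForMidPosOpenPosition_alt trace A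
  unfold MakeUniqueForMidPosOpenPosition MakeUniqueForMidPosOpenPosition_alt
  rw [pvLoopA_zero A trace PySem.Set.empty (by simp [PySem.Set.empty])]
  cases hidx : PySem.List.index? trace A with
  | none => simp
  | some i =>
      simp only [PySem.List.slice_to_natCast, PySem.List.slice_from_natCast]
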